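-- pv_equiv track=rewrite | github.com/MartinThoma/algorithms | codejam/2021/1-Qualification/B.py | get_minimal_cost
-- ===== SOURCE A (Python) =====
-- def get_minimal_cost(x: int, y: int, s: str) -> int:
--     total_cost = 0
--     last_char = None
--     cost = {
--         "C": {"C": 0, "J": x, None: 0},
--         "J": {"C": y, "J": 0, None: 0},
--         None: {"C": 0, "J": 0, None: 0},
--     }
--     for i, char in enumerate(s):
--         if char == "?":
--             continue
--         total_cost += cost[last_char][char]
--         last_char = char
--     return total_cost
-- ===== SOURCE B (Python) =====
-- def get_minimal_cost(x: int, y: int, s: str) -> int: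
--     # Run-length view: collapse the non-'?' characters to their alternating run
--     # heads, then the answer is a closed form in the number of runs and the
--     # first run's letter (transitions strictly alternate CJ, JC, CJ, ...).
--     skip = {"C": False, "J": False, "?": True}
--     runs = []
--     for c in s:
--         if not skip[c] and (not runs or runs[-1] != c):
--             runs.append(c)
--     n = len(runs) - 1  # number of transitions
--     if n <= 0:
--         return 0
--     if runs[0] == "C":
--         return x * ((n + 1) // 2) + y * (n // 2)
--     return y * ((n + 1) // 2) + x * (n // 2)
-- ===== Notes on version B (the rewrite author's own statement) =====
-- stated objective: alternative
-- what changed: Instead of accumulating per-character transition costs with a last_char state and a nested cost dict, B collapses the non-'?' characters to their run heads (adjacent-duplicate elimination) and returns a parity closed form in the number of runs and the first run's letter, since transitions strictly alternate CJ, JC, CJ, ...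
import Mathlib
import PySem

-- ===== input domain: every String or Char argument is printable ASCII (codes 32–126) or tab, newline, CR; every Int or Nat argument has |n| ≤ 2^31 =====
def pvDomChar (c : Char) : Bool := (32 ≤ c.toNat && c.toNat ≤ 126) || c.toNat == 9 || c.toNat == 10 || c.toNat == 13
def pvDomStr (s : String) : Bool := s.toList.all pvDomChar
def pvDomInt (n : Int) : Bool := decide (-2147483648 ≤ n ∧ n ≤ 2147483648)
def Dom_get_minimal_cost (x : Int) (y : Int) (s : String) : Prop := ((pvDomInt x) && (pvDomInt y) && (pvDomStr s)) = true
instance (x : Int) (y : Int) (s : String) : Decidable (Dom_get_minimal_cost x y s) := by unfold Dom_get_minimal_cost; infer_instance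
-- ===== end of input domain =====

set_option maxRecDepth 8000


-- B replaces A's per-character cost accumulation by collapsing the non-'?' characters to
-- their run heads and evaluating a parity closed form over the number of runs (objective: alternative).

-- ===== PORT A =====
-- cost[last_char][char] of A's nested dict; chars other than 'C'/'J' raise KeyError
-- in Python (excluded by Pre_); here they return 0 (unreachable under Pre_).
def pvCostA (x : Int) (y : Int) (last : Option Char) (c : Char) : Int :=
  match last with
  | some 'C' => if c = 'C' then 0 else if c = 'J' then x else 0
  | some 'J' => if c = 'C' then y else if c = 'J' then 0 else 0
  | _ => 0

def get_minimal_cost (x : Int) (y : Int) (s : String) : Int :=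
  (s.toList.foldl
    (fun (st : Int × Option Char) c =>
      if c = '?' then st
      else (st.1 + pvCostA x y st.2 c, some c))
    (0, none)).1

-- ===== PORT B =====
-- skip[c] of B's dict {"C": False, "J": False, "?": True}; other chars raise KeyError
-- in Python (excluded by Pre_); here they return false (unreachable under Pre_).
def pvSkipB (c : Char) : Bool := if c = '?' then true else false

def get_minimal_cost_alt (x : Int) (y : Int) (s : String) : Int :=
  let runs := s.toList.foldl
    (fun (runs : List Char) c =>
      if !pvSkipB c && (runs.isEmpty || runs.getLast? != some c) then runs ++ [c] else runs)
    []
  let n : Int := (runs.length : Int) - 1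
  if n ≤ 0 then 0
  else if runs.headD 'C' = 'C' then  -- runs[0]; runs nonempty here, the default is unreachable
    x * PySem.Int.floordiv (n + 1) 2 + y * PySem.Int.floordiv n 2
  else
    y * PySem.Int.floordiv (n + 1) 2 + x * PySem.Int.floordiv n 2

-- ===== PRECONDITION & SPEC =====
-- Pre_ admits exactly the strings over the alphabet {'C','J','?'}; on any other
-- character both A and B raise KeyError at their dict lookup.
def Pre_get_minimal_cost (x : Int) (y : Int) (s : String) : Prop :=
  s.toList.all (fun c => c == 'C' || c == 'J' || c == '?') = true
instance (x : Int) (y : Int) (s : String) : Decidable (Pre_get_minimal_cost x y s) := by unfold Pre_get_minimal_cost; infer_instance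
def pvWitness_get_minimal_cost : Int × Int × String := (2, 3, "CJ?JC")

def Spec_get_minimal_cost (x : Int) (y : Int) (s : String) (out : Int) : Prop := out = get_minimal_cost_alt x y s
instance (x : Int) (y : Int) (s : String) (out : Int) : Decidable (Spec_get_minimal_cost x y s out) := by unfold Spec_get_minimal_cost; infer_instance

-- ===== CLAIM (what is proved, stated in full; the proofs are below) =====
def Claim_equal_get_minimal_cost : Prop := ∀ (x : Int) (y : Int) (s : String), Dom_get_minimal_cost x y s → Pre_get_minimal_cost x y s → Spec_get_minimal_cost x y s (get_minimal_cost x y s)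

-- ===== LEMMAS AND PROOFS =====

-- A's loop body and B's loop body, named for the lemmas
def pvStepA (x y : Int) (st : Int × Option Char) (c : Char) : Int × Option Char :=
  if c = '?' then st else (st.1 + pvCostA x y st.2 c, some c)

def pvStepB (runs : List Char) (c : Char) : List Char :=
  if !pvSkipB c && (runs.isEmpty || runs.getLast? != some c) then runs ++ [c] else runs

-- B's loop body with the skip test already discharged (on a '?'-free list)
def pvStepB0 (r : List Char) (c : Char) : List Char :=
  if r.isEmpty || r.getLast? != some c then r ++ [c] else r

-- run heads of a dedup-adjacent pass, relative to the previous character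
def pvGo (p : Char) : List Char → List Char
  | [] => []
  | c :: t => if c = p then pvGo p t else c :: pvGo c t

-- transition-cost sum of A's loop once the first character is fixed
def pvCostSum (x y : Int) (lc : Char) : List Char → Int
  | [] => 0
  | c :: t => pvCostA x y (some lc) c + pvCostSum x y c t

-- alternating cost of n transitions starting from C (b = true) or J (b = false)
def pvF (x y : Int) : Bool → Nat → Int
  | _, 0 => 0
  | b, n + 1 => (if b then x else y) + pvF x y (!b) n

theorem pvFoldA_filter (x y : Int) (l : List Char) (st : Int × Option Char) :
    l.foldl (pvStepA x y) st = (l.filter (· ≠ '?')).foldl (pvStepA x y) st := by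
  induction l generalizing st with
  | nil => rfl
  | cons c t ih =>
    by_cases hc : c = '?'
    · subst hc; simpa [List.foldl, pvStepA] using ih st
    · simp [hc, List.foldl, pvStepA, ih]

theorem pvFoldB_filter (l : List Char) (r : List Char) :
    l.foldl pvStepB r = (l.filter (· ≠ '?')).foldl pvStepB0 r := by
  induction l generalizing r with
  | nil => rfl
  | cons c t ih =>
    by_cases hc : c = '?'
    · subst hc; simpa [List.foldl, pvStepB, pvSkipB] using ih r
    · simp [hc, List.foldl, pvStepB, pvStepB0, pvSkipB, ih]

theorem pvStepB0_concat (r : List Char) (p c : Char) :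
    pvStepB0 (r ++ [p]) c = if c = p then r ++ [p] else (r ++ [p]) ++ [c] := by
  by_cases h : c = p
  · subst h; simp [pvStepB0]
  · simp [pvStepB0, h, Ne.symm h]

theorem pvFoldB0_eq (l : List Char) :
    ∀ (r : List Char) (p : Char),
      l.foldl pvStepB0 (r ++ [p]) = r ++ [p] ++ pvGo p l := by
  induction l with
  | nil => intro r p; simp [pvGo]
  | cons c t ih =>
    intro r p
    simp only [List.foldl, pvStepB0_concat]
    by_cases hc : c = p
    · subst hc
      rw [if_pos rfl, ih r c]
      simp [pvGo]
    · rw [if_neg hc, ih (r ++ [p]) c]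
      simp [pvGo, hc]

theorem pvFoldA_costSum (x y : Int) (l : List Char) :
    ∀ (acc : Int) (lc : Char), (∀ c ∈ l, c ≠ '?') →
      (l.foldl (pvStepA x y) (acc, some lc)).1 = acc + pvCostSum x y lc l := by
  induction l with
  | nil => intro acc lc _; simp [pvCostSum]
  | cons c t ih =>
    intro acc lc h
    have hc : c ≠ '?' := h c (List.mem_cons_self ..)
    simp only [List.foldl, pvStepA, if_neg hc]
    rw [ih (acc + pvCostA x y (some lc) c) c (fun d hd => h d (List.mem_cons_of_mem _ hd))]
    simp [pvCostSum]; ring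

theorem pvCostSum_go (x y : Int) (l : List Char) :
    ∀ lc, (∀ c ∈ l, c = 'C' ∨ c = 'J') → (lc = 'C' ∨ lc = 'J') →
      pvCostSum x y lc l = pvF x y (lc == 'C') (pvGo lc l).length := by
  induction l with
  | nil => intro lc _ _; simp [pvCostSum, pvF, pvGo]
  | cons c t ih =>
    intro lc hall hlc
    have hc : c = 'C' ∨ c = 'J' := hall c (List.mem_cons_self ..)
    have hall' : ∀ d ∈ t, d = 'C' ∨ d = 'J' := fun d hd => hall d (List.mem_cons_of_mem _ hd)
    by_cases hcp : c = lc
    · subst hcp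
      have h0 : pvCostA x y (some c) c = 0 := by
        rcases hc with h | h <;> subst h <;> rfl
      simp only [pvCostSum, pvGo, h0, zero_add]
      exact ih c hall' hc
    · have hgo : pvGo lc (c :: t) = c :: pvGo c t := by simp [pvGo, hcp]
      rw [show pvCostSum x y lc (c :: t) = pvCostA x y (some lc) c + pvCostSum x y c t from rfl]
      rw [ih c hall' hc, hgo]
      rcases hlc with h1 | h1 <;> rcases hc with h2 | h2 <;> subst h1 <;> subst h2 <;>
        first
          | exact absurd rfl hcp
          | simp [pvCostA, pvF]

theorem pvF_closed (x y : Int) (n : Nat) :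
    pvF x y true n = x * ((n + 1) / 2 : Nat) + y * ((n / 2 : Nat) : Int)
  ∧ pvF x y false n = y * ((n + 1) / 2 : Nat) + x * ((n / 2 : Nat) : Int) := by
  induction n with
  | zero => simp [pvF]
  | succ n ih =>
    obtain ⟨h1, h2⟩ := ih
    constructor
    · show (if true then x else y) + pvF x y false n = _
      rw [if_pos rfl, h2]
      have e1 : ((n + 1 + 1) / 2 : Nat) = (n / 2 : Nat) + 1 := by omega
      have e2 : ((n + 1) / 2 : Nat) = ((n + 1) / 2 : Nat) := rfl
      rw [e1]; push_cast; ring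
    · show (if false then x else y) + pvF x y true n = _
      rw [if_neg (by simp), h1]
      have e1 : ((n + 1 + 1) / 2 : Nat) = (n / 2 : Nat) + 1 := by omega
      rw [e1]; push_cast; ring

-- ===== VERDICT (by name: the statement is the Claim_ definition above) =====
theorem get_minimal_cost_spec : Claim_equal_get_minimal_cost := by
  intro x y s _ hpre
  unfold Spec_get_minimal_cost get_minimal_cost get_minimal_cost_alt
  rw [show (fun (st : Int × Option Char) c =>
      if c = '?' then st else (st.1 + pvCostA x y st.2 c, some c)) = pvStepA x y from rfl]
  rw [show (fun (runs : List Char) c =>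
      if !pvSkipB c && (runs.isEmpty || runs.getLast? != some c) then runs ++ [c] else runs)
      = pvStepB from rfl]
  rw [pvFoldA_filter, pvFoldB_filter]
  have hall : ∀ c ∈ s.toList.filter (· ≠ '?'), c = 'C' ∨ c = 'J' := by
    intro c hcmem
    have hm := List.mem_of_mem_filter hcmem
    have hne : ¬ (c = '?') := by simpa using List.of_mem_filter hcmem
    have := List.all_eq_true.mp hpre c hm
    simp only [Bool.or_eq_true, beq_iff_eq] at this
    rcases this with (h | h) | h
    · exact Or.inl h
    · exact Or.inr h
    · exact absurd h hne
  cases hft : s.toList.filter (· ≠ '?') with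
  | nil => simp
  | cons c0 t' =>
    rw [hft] at hall
    have hc0 : c0 = 'C' ∨ c0 = 'J' := hall c0 (List.mem_cons_self ..)
    have hall' : ∀ c ∈ t', c = 'C' ∨ c = 'J' := fun c hc => hall c (List.mem_cons_of_mem _ hc)
    have hA : (List.foldl (pvStepA x y) (0, none) (c0 :: t')).1
        = pvF x y (c0 == 'C') (pvGo c0 t').length := by
      have hq : ¬ (c0 = '?') := by rcases hc0 with h | h <;> simp [h]
      have h1 : pvStepA x y ((0 : Int), (none : Option Char)) c0 = (0, some c0) := by
        simp [pvStepA, hq, pvCostA]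
      rw [List.foldl_cons, h1,
        pvFoldA_costSum x y t' 0 c0 (fun c hc => by
          rcases hall' c hc with h | h <;> simp [h]),
        pvCostSum_go x y t' c0 hall' hc0]
      simp
    have hB : List.foldl pvStepB0 [] (c0 :: t') = c0 :: pvGo c0 t' := by
      rw [List.foldl_cons, show pvStepB0 [] c0 = [] ++ [c0] from by simp [pvStepB0],
        pvFoldB0_eq]
      simp
    rw [hA, hB]
    dsimp only
    cases hm : (pvGo c0 t').length with
    | zero => simp [hm, pvF]
    | succ k =>
      have hn : ((c0 :: pvGo c0 t').length : Int) - 1 = ((k + 1 : Nat) : Int) := by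
        simp [hm]
      rw [hn, if_neg (by omega)]
      have e1 : PySem.Int.floordiv (((k + 1 : Nat) : Int) + 1) 2 = ((((k + 1) + 1) / 2 : Nat) : Int) := by
        rw [PySem.Int.floordiv_eq_ediv_of_pos (by norm_num)]; omega
      have e2 : PySem.Int.floordiv ((k + 1 : Nat) : Int) 2 = (((k + 1) / 2 : Nat) : Int) := by
        rw [PySem.Int.floordiv_eq_ediv_of_pos (by norm_num)]; omega
      rw [e1, e2]
      rcases hc0 with h | h <;> subst h
      · rw [if_pos (by simp)]
        exact (pvF_closed x y (k + 1)).1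
      · rw [if_neg (by simp)]
        exact (pvF_closed x y (k + 1)).2
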